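-- pv_equiv track=rewrite | github.com/PietroTotis/CoSo | src/venn.py | specialize
-- ===== SOURCE A (Python) =====
-- def specialize(s1, s2):
--     parts = [[]]
--     for i, c1 in enumerate(s1):
--         c2 = s2[i]
--         if c1 == c2:
--             for p in parts:
--                 p.append(c1)
--         else:
--             part1 = [p + [1] for p in parts]
--             part2 = [p + [-1] for p in parts]
--             parts = part1 + part2
--     return parts
-- ===== SOURCE B (Python) =====
-- def specialize(s1, s2):
--     # count the differing positions (reading s2[i] like A, so a too-short s2 raises)
--     k = sum(1 for i, c1 in enumerate(s1) if c1 != s2[i])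
--     out = []
--     for m in range(2 ** k):
--         part = []
--         j = 0
--         for i, c1 in enumerate(s1):
--             if c1 == s2[i]:
--                 part.append(c1)
--             else:
--                 part.append(1 if (m >> j) & 1 == 0 else -1)
--                 j += 1
--         out.append(part)
--     return out
-- ===== Notes on version B (the rewrite author's own statement) =====
-- stated objective: alternative
-- what changed: A grows the parts table by doubling it in place at each differing position; B counts the k differing positions once and then builds each of the 2^k rows independently from the bits of its row index m (first differing position = least-significant bit, bit 0 -> 1, bit 1 -> -1).
import Mathlib
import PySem

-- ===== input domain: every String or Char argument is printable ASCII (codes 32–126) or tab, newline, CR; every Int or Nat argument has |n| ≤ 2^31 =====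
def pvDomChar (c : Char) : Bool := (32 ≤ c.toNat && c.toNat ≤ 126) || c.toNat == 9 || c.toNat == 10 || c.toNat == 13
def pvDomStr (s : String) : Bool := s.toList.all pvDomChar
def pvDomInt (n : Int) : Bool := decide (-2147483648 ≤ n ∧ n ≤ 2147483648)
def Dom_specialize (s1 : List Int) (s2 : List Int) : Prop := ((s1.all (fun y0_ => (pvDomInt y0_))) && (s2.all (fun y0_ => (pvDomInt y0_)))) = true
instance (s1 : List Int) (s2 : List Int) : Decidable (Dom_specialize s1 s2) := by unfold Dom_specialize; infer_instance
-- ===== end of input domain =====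

-- B replaces A's doubling of the parts list at each differing position by a direct
-- enumeration: each of the 2^k sign rows is built independently from the bits of its
-- row index m (alternative decomposition, same ordering and cost).

-- ===== PORT A =====
-- Python s2[i]; under Pre_ every index used is in range, so the default is never taken.
def pvGetI (s2 : List Int) (i : Int) : Int := (PySem.List.pyGet? s2 i).getD 0

def specialize (s1 : List Int) (s2 : List Int) : List (List Int) :=
  (PySem.List.enumerate s1 0).foldl
    (fun parts ic =>
      if ic.2 == pvGetI s2 ic.1 then
        parts.map (fun p => p ++ [ic.2])
      else
        parts.map (fun p => p ++ [(1 : Int)]) ++ parts.map (fun p => p ++ [(-1 : Int)]))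
    [[]]

-- ===== PORT B =====
def pvCountDiff (s1 : List Int) (s2 : List Int) : Nat :=
  (PySem.List.enumerate s1 0).foldl
    (fun k ic => if ic.2 == pvGetI s2 ic.1 then k else k + 1) 0

-- one step of B's inner loop: state = (part built so far, j = diff positions seen)
def pvBStep (s2 : List Int) (m : Nat) (pj : List Int × Nat) (ic : Int × Int) :
    List Int × Nat :=
  if ic.2 == pvGetI s2 ic.1 then (pj.1 ++ [ic.2], pj.2)
  else (pj.1 ++ [if (m >>> pj.2) &&& 1 == 0 then (1 : Int) else (-1 : Int)], pj.2 + 1)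

def pvPart (s1 : List Int) (s2 : List Int) (m : Nat) : List Int :=
  ((PySem.List.enumerate s1 0).foldl (pvBStep s2 m) ([], 0)).1

def specialize_alt (s1 : List Int) (s2 : List Int) : List (List Int) :=
  (PySem.List.pyRange 0 ((2 ^ pvCountDiff s1 s2 : Nat) : Int) 1).foldl
    (fun out m => out ++ [pvPart s1 s2 m.toNat]) []

-- ===== PRECONDITION & SPEC =====
-- Pre_ excludes exactly the inputs where Python A raises IndexError (s2 shorter than s1);
-- B raises there too.
def Pre_specialize (s1 : List Int) (s2 : List Int) : Prop := s1.length ≤ s2.length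
instance (s1 : List Int) (s2 : List Int) : Decidable (Pre_specialize s1 s2) := by
  unfold Pre_specialize; infer_instance

def pvWitness_specialize : List Int × List Int := ([1, 2, 3], [1, 0, 3])

def Spec_specialize (s1 : List Int) (s2 : List Int) (out : List (List Int)) : Prop :=
  out = specialize_alt s1 s2
instance (s1 : List Int) (s2 : List Int) (out : List (List Int)) :
    Decidable (Spec_specialize s1 s2 out) := by unfold Spec_specialize; infer_instance

-- ===== CLAIM (what is proved, stated in full; the proofs are below) =====
def Claim_equal_specialize : Prop :=
  ∀ (s1 : List Int) (s2 : List Int), Dom_specialize s1 s2 → Pre_specialize s1 s2 →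
    Spec_specialize s1 s2 (specialize s1 s2)

-- ===== LEMMAS AND PROOFS =====

-- the second state component of B's inner fold is the running diff count
lemma pvBStep_snd (s2 : List Int) (m : Nat) (l : List (Int × Int)) :
    ∀ (acc : List Int) (j : Nat),
      (l.foldl (pvBStep s2 m) (acc, j)).2 =
        l.foldl (fun k ic => if ic.2 == pvGetI s2 ic.1 then k else k + 1) j := by
  induction l with
  | nil => intro acc j; rfl
  | cons x l ih =>
      intro acc j
      simp only [List.foldl_cons, pvBStep]
      by_cases h : x.2 == pvGetI s2 x.1
      · simp [h, ih]
      · simp [h, ih]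

-- the diff-count fold shifts with its initial value
lemma count_shift (s2 : List Int) (l : List (Int × Int)) :
    ∀ (j : Nat),
      l.foldl (fun k ic => if ic.2 == pvGetI s2 ic.1 then k else k + 1) j =
        j + l.foldl (fun k ic => if ic.2 == pvGetI s2 ic.1 then k else k + 1) 0 := by
  induction l with
  | nil => intro j; simp
  | cons x l ih =>
      intro j
      simp only [List.foldl_cons]
      rw [ih, ih (if x.2 == pvGetI s2 x.1 then 0 else 0 + 1)]
      by_cases h : x.2 == pvGetI s2 x.1
      · simp [h]
      · simp only [if_neg h]
        omega

-- bits below k are unchanged by adding 2^k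
lemma bit_low_add_pow (m k j : Nat) (h : j < k) :
    ((m + 2 ^ k) >>> j) &&& 1 = (m >>> j) &&& 1 := by
  simp only [Nat.shiftRight_eq_div_pow, Nat.and_one_is_mod]
  obtain ⟨d, hd⟩ : ∃ d, k = d + 1 + j := ⟨k - j - 1, by omega⟩
  subst hd
  rw [show (2 : ℕ) ^ (d + 1 + j) = 2 ^ d * 2 * 2 ^ j from by rw [← pow_succ, ← pow_add]]
  rw [Nat.add_mul_div_right _ _ (Nat.two_pow_pos j)]
  omega

lemma bit_high_of_lt (m k : Nat) (h : m < 2 ^ k) :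
    ((2 ^ k + m) >>> k) &&& 1 = 1 := by
  simp only [Nat.shiftRight_eq_div_pow, Nat.and_one_is_mod]
  have h1 : (2 ^ k + m) / 2 ^ k = 1 := by
    rw [Nat.add_comm, Nat.add_div_right _ (Nat.two_pow_pos k), Nat.div_eq_of_lt h]
  rw [h1]

lemma bit_high_zero (m k : Nat) (h : m < 2 ^ k) : ((m >>> k) &&& 1) = 0 := by
  simp only [Nat.shiftRight_eq_div_pow, Nat.and_one_is_mod]
  rw [Nat.div_eq_of_lt h]

-- B's inner fold only reads bits of m below (initial j + number of diffs in l)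
lemma pvBStep_add_pow (s2 : List Int) (l : List (Int × Int)) (k : Nat) :
    ∀ (m : Nat) (acc : List Int) (j : Nat),
      j + l.foldl (fun k ic => if ic.2 == pvGetI s2 ic.1 then k else k + 1) 0 ≤ k →
      l.foldl (pvBStep s2 (m + 2 ^ k)) (acc, j) = l.foldl (pvBStep s2 m) (acc, j) := by
  induction l with
  | nil => intro m acc j _; rfl
  | cons x l ih =>
      intro m acc j hle
      simp only [List.foldl_cons] at hle ⊢
      rw [count_shift s2 l] at hle
      by_cases h : x.2 == pvGetI s2 x.1
      · rw [if_pos h] at hle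
        simp only [pvBStep, if_pos h]
        exact ih m _ j (by omega)
      · rw [if_neg h] at hle
        have hj : j < k := by omega
        simp only [pvBStep, if_neg h]
        rw [bit_low_add_pow m k j hj]
        exact ih m _ (j + 1) (by omega)

-- B expanded: a plain map over List.range
lemma alt_eq (s1 s2 : List Int) :
    specialize_alt s1 s2 =
      (List.range (2 ^ pvCountDiff s1 s2)).map (fun m => pvPart s1 s2 m) := by
  unfold specialize_alt
  rw [PySem.List.pyRange_one, List.foldl_map, PySem.List.foldl_append_singleton_eq_map,
      List.nil_append]
  rw [show ((((2 ^ pvCountDiff s1 s2 : Nat) : Int)) - 0).toNat = 2 ^ pvCountDiff s1 s2 from by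
    rw [sub_zero, Int.toNat_natCast]]
  apply List.map_congr_left
  intro m _
  simp

-- the main induction: A equals the range-map form
lemma main_eq (s2 : List Int) (s1 : List Int) (h : s1.length ≤ s2.length) :
    specialize s1 s2 =
      (List.range (2 ^ pvCountDiff s1 s2)).map (fun m => pvPart s1 s2 m) := by
  induction s1 using List.reverseRecOn with
  | nil => rfl
  | append_singleton xs x ih =>
      have hn : xs.length < s2.length := by
        simp at h; omega
      have henum : PySem.List.enumerate (xs ++ [x]) 0 =
          PySem.List.enumerate xs 0 ++ [((xs.length : Int), x)] := by
        rw [PySem.List.enumerate_append]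
        simp [PySem.List.enumerate_cons, PySem.List.enumerate_nil]
      have hget : pvGetI s2 (xs.length : Int) = s2[xs.length] := by
        simp [pvGetI, PySem.List.pyGet?_natCast, List.getElem?_eq_getElem hn]
      set c2 := s2[xs.length] with hc2
      have hcount : pvCountDiff (xs ++ [x]) s2 =
          if x == c2 then pvCountDiff xs s2 else pvCountDiff xs s2 + 1 := by
        unfold pvCountDiff
        rw [henum, List.foldl_append]
        simp [hget]
      have hfold : ∀ m, (PySem.List.enumerate xs 0).foldl (pvBStep s2 m) ([], 0) =
          (pvPart xs s2 m, pvCountDiff xs s2) := by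
        intro m
        have h2 := pvBStep_snd s2 m (PySem.List.enumerate xs 0) [] 0
        exact Prod.ext rfl h2
      have hpart : ∀ m, pvPart (xs ++ [x]) s2 m =
          if x == c2 then pvPart xs s2 m ++ [x]
          else pvPart xs s2 m ++
            [if (m >>> pvCountDiff xs s2) &&& 1 == 0 then (1 : Int) else (-1 : Int)] := by
        intro m
        unfold pvPart
        rw [henum, List.foldl_append, hfold m]
        simp only [List.foldl_cons, List.foldl_nil, pvBStep, hget]
        by_cases hx : x == c2
        · simp [hx]
        · simp [hx]
      have hA : specialize (xs ++ [x]) s2 =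
          if x == c2 then (specialize xs s2).map (fun p => p ++ [x])
          else (specialize xs s2).map (fun p => p ++ [(1 : Int)]) ++
               (specialize xs s2).map (fun p => p ++ [(-1 : Int)]) := by
        unfold specialize
        rw [henum, List.foldl_append]
        simp only [List.foldl_cons, List.foldl_nil, hget]
      have ih' := ih (by omega)
      set K := pvCountDiff xs s2 with hK
      by_cases hx : x == c2
      · rw [hA, hcount, ih']
        simp only [hx, if_pos]
        rw [List.map_map]
        apply List.map_congr_left
        intro m _
        simp [hpart m, hx]
      · rw [hA, hcount, ih']
        simp only [hx, if_false, Bool.false_eq_true]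
        rw [pow_succ, mul_two, List.range_add, List.map_append, List.map_map, List.map_map,
            List.map_map]
        congr 1
        · apply List.map_congr_left
          intro m hm
          rw [List.mem_range] at hm
          simp only [Function.comp]
          rw [hpart m]
          simp [hx, bit_high_zero m K hm]
        · apply List.map_congr_left
          intro m hm
          rw [List.mem_range] at hm
          simp only [Function.comp]
          rw [hpart (2 ^ K + m)]
          simp only [hx, if_false, Bool.false_eq_true]
          rw [bit_high_of_lt m K hm]
          have hlow : pvPart xs s2 (2 ^ K + m) = pvPart xs s2 m := by
            unfold pvPart
            rw [Nat.add_comm]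
            rw [pvBStep_add_pow s2 (PySem.List.enumerate xs 0) K m [] 0 (by simp [hK, pvCountDiff])]
          rw [hlow]
          simp

-- ===== VERDICT (by name: the statement is the Claim_ definition above) =====
theorem specialize_spec : Claim_equal_specialize := by
  intro s1 s2 _ hpre
  unfold Spec_specialize
  rw [alt_eq, main_eq s2 s1 hpre]
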